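-- pv_equiv track=rewrite | github.com/AIBincultars/PiCo-Gen | data/instruction_generator.py | _estimate_bars_performed
-- ===== SOURCE A (Python) =====
-- from typing import Dict, Any, List, Tuple, Optional
--
-- def _estimate_bars_performed(bars_tokens: List[List[str]]) -> int:
--     """近似考虑 |: :| 重复，估计实际演奏小节数"""
--     performed = 0
--     i = 0
--     in_repeat = False
--     repeat_start_idx = None
--
--     while i < len(bars_tokens):
--         bar = bars_tokens[i]
--         if len(bar)==1 and bar[0] == '|:':
--             in_repeat = True
--             repeat_start_idx = i+1
--             i += 1
--             continue
--         if len(bar)==1 and bar[0] == ':|':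
--             if in_repeat and repeat_start_idx is not None:
--                 seg = bars_tokens[repeat_start_idx:i]
--                 seg_count = sum(1 for b in seg if not (len(b)==1 and b[0] in ('|:',':|')))
--                 performed += seg_count  # 第二遍
--             in_repeat = False
--             repeat_start_idx = None
--             i += 1
--             continue
--
--         if not (len(bar)==1 and bar[0] in ('|:',':|')):
--             performed += 1
--         i += 1
--
--     return max(1, performed)
-- ===== SOURCE B (Python) =====
-- from typing import List
--
-- def _estimate_bars_performed(bars_tokens: List[List[str]]) -> int:
--     """Single forward pass: maintain a running count of non-marker bars seen
--     since the last '|:' so the ':|' branch needs no re-scan of the segment."""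
--     performed = 0
--     since_repeat = 0
--     in_repeat = False
--     for bar in bars_tokens:
--         if len(bar) == 1 and bar[0] == '|:':
--             in_repeat = True
--             since_repeat = 0
--         elif len(bar) == 1 and bar[0] == ':|':
--             if in_repeat:
--                 performed += since_repeat
--             in_repeat = False
--             since_repeat = 0
--         else:
--             performed += 1
--             if in_repeat:
--                 since_repeat += 1
--     return max(1, performed)
-- ===== Notes on version B (the rewrite author's own statement) =====
-- stated objective: alternative
-- what changed: Replaced A's index-based while-loop that re-scans the whole repeated segment bars_tokens[repeat_start:i] at each ':|' with a single forward pass that incrementally maintains the count of non-marker bars since the last '|:'.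
import Mathlib
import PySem

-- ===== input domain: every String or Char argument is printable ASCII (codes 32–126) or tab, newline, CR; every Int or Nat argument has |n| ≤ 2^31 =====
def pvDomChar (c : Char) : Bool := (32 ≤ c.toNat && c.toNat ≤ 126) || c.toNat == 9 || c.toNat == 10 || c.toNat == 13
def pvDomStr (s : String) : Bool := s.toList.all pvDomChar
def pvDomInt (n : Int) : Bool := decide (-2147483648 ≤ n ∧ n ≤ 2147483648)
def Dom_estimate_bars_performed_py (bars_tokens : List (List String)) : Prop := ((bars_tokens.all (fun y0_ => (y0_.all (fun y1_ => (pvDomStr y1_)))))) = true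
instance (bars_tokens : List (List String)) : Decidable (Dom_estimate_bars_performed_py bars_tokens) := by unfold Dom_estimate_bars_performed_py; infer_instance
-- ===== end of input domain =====

-- B replaces A's while-loop + inner segment re-scan by one forward fold that keeps a
-- running count of non-marker bars since the last '|:' (objective: alternative decomposition).


-- ===== PORT A =====
-- seg_count = sum(1 for b in seg if not (len(b)==1 and b[0] in ('|:',':|')))
def pvA_segCount (seg : List (List String)) : Int :=
  seg.foldl (fun acc b => if !(b == ["|:"] || b == [":|"]) then acc + 1 else acc) 0

def pvA_loop (bars : List (List String)) (i : Nat) (performed : Int)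
    (in_repeat : Bool) (rsi : Option Nat) : Int :=
  if i < bars.length then
    let bar := bars.getD i []
    if bar == ["|:"] then
      pvA_loop bars (i+1) performed true (some (i+1))
    else if bar == [":|"] then
      let performed' :=
        if in_repeat && rsi.isSome then
          performed + pvA_segCount
            (PySem.List.slice bars (some ((rsi.getD 0 : Nat) : Int)) (some ((i : Nat) : Int)))
        else performed
      pvA_loop bars (i+1) performed' false none
    else
      let performed' := if !(bar == ["|:"] || bar == [":|"]) then performed + 1 else performed
      pvA_loop bars (i+1) performed' in_repeat rsi
  else max 1 performed
termination_by bars.length - i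

def estimate_bars_performed_py (bars_tokens : List (List String)) : Int :=
  pvA_loop bars_tokens 0 0 false none

-- ===== PORT B =====
def pvB_step (st : Int × Int × Bool) (bar : List String) : Int × Int × Bool :=
  if bar == ["|:"] then (st.1, 0, true)
  else if bar == [":|"] then ((if st.2.2 then st.1 + st.2.1 else st.1), 0, false)
  else (st.1 + 1, (if st.2.2 then st.2.1 + 1 else st.2.1), st.2.2)

def estimate_bars_performed_py_alt (bars_tokens : List (List String)) : Int :=
  max 1 (bars_tokens.foldl pvB_step (0, 0, false)).1

-- ===== PRECONDITION & SPEC =====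
def Spec_estimate_bars_performed_py (bars_tokens : List (List String)) (out : Int) : Prop := out = estimate_bars_performed_py_alt bars_tokens
instance (bars_tokens : List (List String)) (out : Int) : Decidable (Spec_estimate_bars_performed_py bars_tokens out) := by unfold Spec_estimate_bars_performed_py; infer_instance

-- ===== CLAIM (what is proved, stated in full; the proofs are below) =====
def Claim_equal_estimate_bars_performed_py : Prop := ∀ (bars_tokens : List (List String)), Dom_estimate_bars_performed_py bars_tokens → Spec_estimate_bars_performed_py bars_tokens (estimate_bars_performed_py bars_tokens)

-- ===== LEMMAS AND PROOFS =====

theorem pvA_segCount_append (xs : List (List String)) (b : List String) :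
    pvA_segCount (xs ++ [b]) =
      pvA_segCount xs + (if !(b == ["|:"] || b == [":|"]) then 1 else 0) := by
  unfold pvA_segCount
  rw [List.foldl_append]
  simp only [List.foldl]
  split <;> omega

-- loop invariant: A's state (performed, in_repeat, rsi) corresponds to B's fold state
-- (performed, since, in_repeat) over the remaining suffix, where `since` is the
-- non-marker count of bars[rsi:i].
theorem pv_invariant (bars : List (List String)) (i : Nat) (performed since : Int)
    (inr : Bool) (rsi : Option Nat)
    (h : if inr then ∃ r, rsi = some r ∧ r ≤ i ∧
            since = pvA_segCount ((bars.drop r).take (i - r))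
         else rsi = none ∧ since = 0) :
    pvA_loop bars i performed inr rsi =
      max 1 ((bars.drop i).foldl pvB_step (performed, since, inr)).1 := by
  by_cases hi : i < bars.length
  · have hbar : bars.drop i = bars.getD i [] :: bars.drop (i+1) := by
      rw [List.getD_eq_getElem?_getD, List.getElem?_eq_getElem hi, Option.getD_some]
      exact List.drop_eq_getElem_cons hi
    rw [pvA_loop, if_pos hi, hbar, List.foldl_cons]
    set bar := bars.getD i [] with hbardef
    have hbi : bars[i]? = some bar := by
      rw [hbardef, List.getD_eq_getElem?_getD, List.getElem?_eq_getElem hi]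
      rfl
    by_cases h1 : bar == ["|:"]
    · rw [if_pos h1]
      rw [pv_invariant bars (i+1) performed 0 true (some (i+1))
          (by simp only [reduceIte]
              exact ⟨i+1, rfl, le_refl _, by simp [pvA_segCount]⟩)]
      simp [pvB_step, h1]
    · by_cases h2 : bar == [":|"]
      · rw [if_neg h1, if_pos h2]
        rcases inr with _ | _
        · obtain ⟨hrsi, hs⟩ : rsi = none ∧ since = 0 := by simpa using h
          subst hrsi hs
          simp only [Bool.false_and, Bool.false_eq_true, if_false]
          rw [pv_invariant bars (i+1) performed 0 false none (by simp)]
          simp [pvB_step, h1, h2]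
        · obtain ⟨r, hrsi, hri, hs⟩ :
              ∃ r, rsi = some r ∧ r ≤ i ∧
                since = pvA_segCount ((bars.drop r).take (i - r)) := by simpa using h
          subst hrsi
          simp only [Option.isSome_some, Bool.and_self, if_true, Option.getD_some]
          rw [pv_invariant bars (i+1)
              (performed + pvA_segCount
                (PySem.List.slice bars (some ((r : Nat) : Int)) (some ((i : Nat) : Int))))
              0 false none (by simp)]
          have hslice : PySem.List.slice bars (some ((r : Nat) : Int)) (some ((i : Nat) : Int))
              = (bars.drop r).take (i - r) := PySem.List.slice_natCast bars r i
          simp [pvB_step, h1, h2, hslice, hs]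
      · rw [if_neg h1, if_neg h2]
        have hnm : (bar == ["|:"] || bar == [":|"]) = false := by simp [h1, h2]
        rcases inr with _ | _
        · obtain ⟨hrsi, hs⟩ : rsi = none ∧ since = 0 := by simpa using h
          subst hrsi hs
          simp only [hnm, Bool.not_false, if_true]
          rw [pv_invariant bars (i+1) (performed + 1) 0 false none (by simp)]
          simp [pvB_step, h1, h2]
        · obtain ⟨r, hrsi, hri, hs⟩ :
              ∃ r, rsi = some r ∧ r ≤ i ∧
                since = pvA_segCount ((bars.drop r).take (i - r)) := by simpa using h
          subst hrsi
          have htake : (bars.drop r).take (i + 1 - r)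
              = (bars.drop r).take (i - r) ++ [bar] := by
            have h1r : i + 1 - r = (i - r) + 1 := by omega
            rw [h1r, List.take_add_one]
            have hg : (bars.drop r)[i - r]? = some bar := by
              rw [List.getElem?_drop]
              have hri' : r + (i - r) = i := by omega
              rw [hri', hbi]
            simp [hg]
          have hsince : since + 1 = pvA_segCount ((bars.drop r).take (i + 1 - r)) := by
            rw [htake, pvA_segCount_append, hs]
            simp [h1, h2]
          simp only [hnm, Bool.not_false, if_true]
          rw [pv_invariant bars (i+1) (performed + 1) (since + 1) true (some r)
              (by simp only [reduceIte]
                  exact ⟨r, rfl, by omega, hsince⟩)]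
          simp [pvB_step, h1, h2]
  · rw [pvA_loop, if_neg hi, List.drop_eq_nil_of_le (by omega)]
    simp
termination_by bars.length - i

-- ===== VERDICT (by name: the statement is the Claim_ definition above) =====
theorem estimate_bars_performed_py_spec : Claim_equal_estimate_bars_performed_py := by
  intro bars _
  unfold Spec_estimate_bars_performed_py estimate_bars_performed_py estimate_bars_performed_py_alt
  rw [pv_invariant bars 0 0 0 false none (by simp)]
  simp
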